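-- pv_equiv track=rewrite | github.com/NyanNyanGringo/NukeX-VP_MyLittleHelpers | VP_LittleHelpers/vp_little_helpers/check_userconfig_valid.py | check_color_string_validity
-- ===== SOURCE A (Python) =====
-- def check_color_string_validity(input_string):
--     allowed_characters = set("0123456789|. ")
--     for char in input_string:
--         if char not in allowed_characters:
--             return False
--
--     if not len(input_string.split("|")) == 3:
--         return False
--
--     return True
-- ===== SOURCE B (Python) =====
-- def check_color_string_validity(input_string):
--     pipes = 0
--     for char in input_string:
--         if char == "|":
--             pipes += 1
--         elif char not in "0123456789. ":
--             return False
--     return pipes == 2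
-- ===== Notes on version B (the rewrite author's own statement) =====
-- stated objective: alternative
-- what changed: A validates characters in one loop and then counts pipes indirectly by splitting the string and checking for three pieces; B is a single-pass state machine that counts pipe characters while validating the others, with no split and no intermediate list.
import Mathlib
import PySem

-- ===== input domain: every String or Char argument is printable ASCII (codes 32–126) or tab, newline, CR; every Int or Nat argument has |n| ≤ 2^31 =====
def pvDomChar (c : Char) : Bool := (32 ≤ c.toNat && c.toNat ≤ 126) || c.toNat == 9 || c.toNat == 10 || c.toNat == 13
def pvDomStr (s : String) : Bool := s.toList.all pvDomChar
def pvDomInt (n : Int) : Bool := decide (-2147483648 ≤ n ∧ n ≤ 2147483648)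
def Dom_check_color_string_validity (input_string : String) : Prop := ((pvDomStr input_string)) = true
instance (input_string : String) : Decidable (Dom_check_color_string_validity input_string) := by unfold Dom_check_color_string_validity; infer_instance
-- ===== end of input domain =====

-- B replaces A's membership loop plus split-based pipe count by one single-pass state machine (count pipes while validating chars); objective: alternative/idiomatic, same cost class.

-- ===== PORT A =====
-- the for-loop with its early 'return False'
def pvLoopA (allowed : PySem.Set Char) : List Char → Bool
  | [] => true
  | c :: rest => if (allowed.contains c) = false then false else pvLoopA allowed rest

def check_color_string_validity (input_string : String) : Bool :=
  let allowed_characters := PySem.Set.ofList ("0123456789|. ".toList)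
  match pvLoopA allowed_characters input_string.toList with
  | false => false
  | true =>
    if ¬ ((PySem.Chars.splitOn input_string.toList ("|".toList)).length = 3) then false
    else true

-- ===== PORT B =====
-- the single loop: count pipes, reject a char outside "0123456789. ", then compare the count with 2
def pvLoopB (pipes : Int) : List Char → Bool
  | [] => pipes == 2
  | c :: rest =>
    if c = '|' then pvLoopB (pipes + 1) rest
    else if (PySem.Chars.isIn [c] ("0123456789. ".toList)) = false then false
    else pvLoopB pipes rest

def check_color_string_validity_alt (input_string : String) : Bool :=
  pvLoopB 0 input_string.toList

-- ===== PRECONDITION & SPEC =====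
def Spec_check_color_string_validity (input_string : String) (out : Bool) : Prop := out = check_color_string_validity_alt input_string
instance (input_string : String) (out : Bool) : Decidable (Spec_check_color_string_validity input_string out) := by unfold Spec_check_color_string_validity; infer_instance

-- ===== CLAIM (what is proved, stated in full; the proofs are below) =====
def Claim_equal_check_color_string_validity : Prop := ∀ (input_string : String), Dom_check_color_string_validity input_string → Spec_check_color_string_validity input_string (check_color_string_validity input_string)

-- ===== LEMMAS AND PROOFS =====

-- A's loop is an 'all chars allowed' check
theorem pvLoopA_eq (allowed : PySem.Set Char) (cs : List Char) :
    pvLoopA allowed cs = cs.all (fun c => allowed.contains c) := by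
  induction cs with
  | nil => rfl
  | cons c rest ih =>
    simp only [pvLoopA, List.all_cons, ih]
    cases h : allowed.contains c <;> simp

-- pointwise: membership in A's set equals '|'-test or membership in B's char list
theorem pv_allowed_iff (c : Char) :
    ((PySem.Set.ofList ("0123456789|. ".toList)).contains c) =
      (c == '|' || ("0123456789. ".toList).contains c) := by
  have h1 : ("0123456789|. ".toList) = ['0','1','2','3','4','5','6','7','8','9','|','.',' '] := by decide
  have h2 : ("0123456789. ".toList) = ['0','1','2','3','4','5','6','7','8','9','.',' '] := by decide
  rw [h1, h2]
  by_cases h : c ∈ (['0','1','2','3','4','5','6','7','8','9','|','.',' '] : List Char)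
  · fin_cases h <;> decide
  · simp only [List.mem_cons, not_or] at h
    obtain ⟨h0,h1,h2,h3,h4,h5,h6,h7,h8,h9,hp,hd,hs,_⟩ := h
    simp [PySem.Set.mem_ofList, List.contains_eq_mem, h0,h1,h2,h3,h4,h5,h6,h7,h8,h9,hp,hd,hs]

-- single-char 'in' on a string is list membership
theorem pv_isIn_single (c : Char) (cs : List Char) :
    PySem.Chars.isIn [c] cs = cs.contains c := by
  cases h : cs.contains c
  · rw [PySem.Chars.isIn_eq_false_iff, List.singleton_infix_iff]
    simpa using h
  · rw [PySem.Chars.isIn_iff_infix, List.singleton_infix_iff]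
    simpa using h

-- B's loop characterised: valid chars, then pipe count comparison
theorem pvLoopB_eq (cs : List Char) (p : Int) :
    pvLoopB p cs =
      if cs.all (fun c => c == '|' || ("0123456789. ".toList).contains c)
      then (p + (cs.count '|' : Int)) == 2 else false := by
  induction cs generalizing p with
  | nil => simp [pvLoopB]
  | cons c rest ih =>
    by_cases hc : c = '|'
    · subst hc
      simp only [pvLoopB, ih, List.all_cons, List.count_cons_self,
        BEq.rfl, Bool.true_or, Bool.true_and]
      have harr : p + 1 + (List.count '|' rest : Int)
          = p + ((List.count '|' rest + 1 : Nat) : Int) := by push_cast; ring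
      simp only [harr, if_true]
    · simp only [pvLoopB, if_neg hc, pv_isIn_single, List.all_cons,
        List.count_cons_of_ne hc]
      have hbe : (c == '|') = false := by simpa using hc
      cases hmem : ("0123456789. ".toList).contains c
      · simp [hbe]
      · simp [hbe, ih]

-- splitOn.go: the number of pieces is pieces-so-far + 1 + pipes left
theorem pv_go_len (fuel : Nat) (l cur : List Char) (acc : List (List Char))
    (h : l.length < fuel) :
    (PySem.Chars.splitOn.go ("|".toList) fuel l cur acc).length
      = acc.length + 1 + l.count '|' := by
  induction fuel generalizing l cur acc with
  | zero => omega
  | succ fuel ih =>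
    cases l with
    | nil => simp [PySem.Chars.splitOn.go]
    | cons c rest =>
      simp only [PySem.Chars.splitOn.go]
      by_cases hc : c = '|'
      · subst hc
        rw [if_pos (by simp [List.isPrefixOf])]
        have : "|".toList.length = 1 := by decide
        rw [this]
        simp only [List.drop_one, List.tail_cons,
          ih rest [] _ (by simpa using Nat.lt_of_succ_lt_succ h)]
        simp [List.count_cons_self]
        omega
      · rw [if_neg (by simp [List.isPrefixOf]; exact fun hh => absurd hh.symm hc)]
        rw [ih rest (c :: cur) acc (by simpa using Nat.lt_of_succ_lt_succ h)]
        rw [List.count_cons_of_ne hc]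

theorem pv_splitOn_len (cs : List Char) :
    (PySem.Chars.splitOn cs ("|".toList)).length = 1 + cs.count '|' := by
  rw [PySem.Chars.splitOn, pv_go_len _ _ _ _ (by omega)]
  simp

-- ===== VERDICT (by name: the statement is the Claim_ definition above) =====
theorem check_color_string_validity_spec : Claim_equal_check_color_string_validity := by
  intro s _
  show check_color_string_validity s = check_color_string_validity_alt s
  rw [check_color_string_validity, check_color_string_validity_alt, pvLoopA_eq, pvLoopB_eq]
  simp only [pv_allowed_iff]
  cases hall : s.toList.all (fun c => c == '|' || ("0123456789. ".toList).contains c)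
  · simp
  · simp only [pv_splitOn_len]
    by_cases hcnt : s.toList.count '|' = 2
    · simp [hcnt]
    · have : ¬ (1 + s.toList.count '|' = 3) := by omega
      simp [this]
      omega
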